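-- pv_equiv track=rewrite | github.com/ikramsaedi/foc | time-series-project/load_balancing.py | balance_lte
-- ===== SOURCE A (Python) =====
-- def balance_lte(flows1, flows2):
--     '''
--         Takes in a list of inflows `flows1` and a list of inflows `flows2`
--         of the same length.
--
--         Returns the volatility (integer) of the best load balance for
--         `flows1` and `flows2`.
--     '''
--
--     # Type checks to enforce that flows1 and flows2 are of the same length
--     if(len(flows1) != len(flows2)):
--         raise Exception("Each time series must be of the same length!")
--
--     # A list of flows that contains each possible combination of padded flows
--     delayed_flow_combos = [(flows1, flows2)]
--     for i in range(len(flows1) - 1):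
--         delayed_flow_combos.append(calculate_padding(flows1, flows2, i + 1))
--         delayed_flow_combos.append(calculate_padding(flows2, flows1, i + 1))
--
--     # For each possible flow combination, calculate their combined load
--     combined_loads = []
--     for lists in delayed_flow_combos:
--         combined_load = list(map(lambda x, y: x + y, lists[0], lists[1]))
--         combined_loads.append(combined_load)
--
--     # For each combined load, calculate their volatility
--     volatilities = []
--     for combined_load in combined_loads:
--         volatility = max(combined_load) - min(combined_load)
--         volatilities.append(volatility)
--
--     # The "best" volatility is the lowest volatility, so return that
--     return min(volatilities)
--
-- def calculate_padding(flows1, flows2, padding):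
--     '''
--         Takes in a list of inflows `flows1`, list of inflows `flows2`
--         of the same length, and padding
--
--         Returns each flow with the appropriate amount of padding
--     '''
--     flows1_copy = flows1.copy()
--     flows2_copy = flows2.copy()
--
--     # Pad each flow by `padding` zeroes
--     for _k in range(padding):
--         flows1_copy.insert(0, 0)
--         flows2_copy.append(0)
--     return (flows1_copy, flows2_copy)
-- ===== SOURCE B (Python) =====
-- def _shift_vol(x, y, p, n):
--     # Combined series when x is delayed by p steps: y[:p], then x[i]+y[i+p], then x[n-p:].
--     hi = lo = y[0]
--     for v in y[1:p]:
--         if v > hi: hi = v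
--         if v < lo: lo = v
--     for a, b in zip(x, y[p:]):
--         v = a + b
--         if v > hi: hi = v
--         if v < lo: lo = v
--     for v in x[n - p:]:
--         if v > hi: hi = v
--         if v < lo: lo = v
--     return hi - lo
--
-- def balance_lte(flows1, flows2):
--     if len(flows1) != len(flows2):
--         raise Exception("Each time series must be of the same length!")
--     n = len(flows1)
--     hi = lo = flows1[0] + flows2[0]
--     for a, b in zip(flows1[1:], flows2[1:]):
--         v = a + b
--         if v > hi: hi = v
--         if v < lo: lo = v
--     best = hi - lo
--     for p in range(1, n):
--         best = min(best, _shift_vol(flows1, flows2, p, n), _shift_vol(flows2, flows1, p, n))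
--     return best
-- ===== Notes on version B (the rewrite author's own statement) =====
-- stated objective: faster
-- what changed: Instead of materializing every zero-padded pair, the elementwise-sum list and accumulated combo/load/volatility lists, B computes each shift's max and min in one streaming pass over three index-shifted segments (prefix of the undelayed series, overlap sums via zip, suffix of the delayed series) and keeps a running minimum volatility.
import Mathlib
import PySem

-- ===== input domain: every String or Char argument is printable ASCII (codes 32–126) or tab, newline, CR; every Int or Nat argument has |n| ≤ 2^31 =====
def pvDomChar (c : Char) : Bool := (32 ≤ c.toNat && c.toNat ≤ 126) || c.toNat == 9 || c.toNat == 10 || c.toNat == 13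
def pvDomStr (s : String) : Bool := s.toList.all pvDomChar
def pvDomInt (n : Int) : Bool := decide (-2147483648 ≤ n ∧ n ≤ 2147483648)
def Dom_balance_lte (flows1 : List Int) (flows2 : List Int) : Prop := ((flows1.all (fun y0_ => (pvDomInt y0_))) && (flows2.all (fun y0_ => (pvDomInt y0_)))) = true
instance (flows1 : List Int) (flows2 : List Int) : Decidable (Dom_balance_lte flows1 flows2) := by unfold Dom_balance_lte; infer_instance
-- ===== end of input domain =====

-- B replaces A's zero-padded list building and accumulated combo/load/volatility lists by a
-- streaming max/min pass over three index-shifted segments per shift, with a running minimum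
-- (measured constant-factor speedup; same return value on Pre_).

-- ===== PORT A =====
def pyCalculatePadding (flows1 : List Int) (flows2 : List Int) (padding : Int) : List Int × List Int :=
  (PySem.List.pyRange 0 padding 1).foldl
    (fun (c : List Int × List Int) _k => (PySem.List.insert c.1 0 0, c.2 ++ [0]))
    (flows1, flows2)

def balance_lte (flows1 : List Int) (flows2 : List Int) : Int :=
  if (flows1.length : Int) ≠ (flows2.length : Int) then 0   -- Python raises Exception here; excluded by Pre_
  else
    let combos := (PySem.List.pyRange 0 ((flows1.length : Int) - 1) 1).foldl
      (fun acc i => acc ++ [pyCalculatePadding flows1 flows2 (i + 1),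
                            pyCalculatePadding flows2 flows1 (i + 1)])
      [(flows1, flows2)]
    let loads := combos.foldl
      (fun acc ls => acc ++ [List.zipWith (fun a b => a + b) ls.1 ls.2]) []
    let vols := loads.foldl
      (fun acc c => acc ++ [((PySem.List.max? c (fun v => v)).getD 0)
                            - ((PySem.List.min? c (fun v => v)).getD 0)]) []   -- max/min([]) raise; excluded by Pre_
    (PySem.List.min? vols (fun v => v)).getD 0

-- ===== PORT B =====
-- running (hi, lo) update: the two `if` statements of Source B's inner loops
def pvStep (hl : Int × Int) (v : Int) : Int × Int :=
  (if v > hl.1 then v else hl.1, if v < hl.2 then v else hl.2)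

def pyShiftVol (x : List Int) (y : List Int) (p : Int) (n : Int) : Int :=
  let y0 := (PySem.List.pyGet? y 0).getD 0                          -- y[0]; Pre_ rules out the empty list
  let hl1 := (PySem.List.slice y (some 1) (some p)).foldl pvStep (y0, y0)
  let hl2 := (x.zip (PySem.List.slice y (some p) none)).foldl
      (fun hl ab => pvStep hl (ab.1 + ab.2)) hl1
  let hl3 := (PySem.List.slice x (some (n - p)) none).foldl pvStep hl2
  hl3.1 - hl3.2

def balance_lte_alt (flows1 : List Int) (flows2 : List Int) : Int :=
  if (flows1.length : Int) ≠ (flows2.length : Int) then 0   -- Python raises Exception here; excluded by Pre_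
  else
    let v0 := (PySem.List.pyGet? flows1 0).getD 0 + (PySem.List.pyGet? flows2 0).getD 0
    let hl := ((PySem.List.slice flows1 (some 1) none).zip (PySem.List.slice flows2 (some 1) none)).foldl
      (fun hl ab => pvStep hl (ab.1 + ab.2)) (v0, v0)
    (PySem.List.pyRange 1 (flows1.length : Int) 1).foldl
      (fun best p => min (min best (pyShiftVol flows1 flows2 p (flows1.length : Int)))
                         (pyShiftVol flows2 flows1 p (flows1.length : Int)))
      (hl.1 - hl.2)

-- ===== PRECONDITION & SPEC =====
-- Pre_ excludes exactly the inputs where A raises: a length mismatch (explicit Exception) and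
-- empty inputs (max([]) raises ValueError).
def Pre_balance_lte (flows1 : List Int) (flows2 : List Int) : Prop :=
  flows1.length = flows2.length ∧ flows1 ≠ []
instance (flows1 : List Int) (flows2 : List Int) : Decidable (Pre_balance_lte flows1 flows2) := by
  unfold Pre_balance_lte; infer_instance
def pvWitness_balance_lte : List Int × List Int := ([1, 5], [2, 3])

def Spec_balance_lte (flows1 : List Int) (flows2 : List Int) (out : Int) : Prop := out = balance_lte_alt flows1 flows2
instance (flows1 : List Int) (flows2 : List Int) (out : Int) : Decidable (Spec_balance_lte flows1 flows2 out) := by unfold Spec_balance_lte; infer_instance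

-- ===== CLAIM (what is proved, stated in full; the proofs are below) =====
def Claim_equal_balance_lte : Prop := ∀ (flows1 : List Int) (flows2 : List Int), Dom_balance_lte flows1 flows2 → Pre_balance_lte flows1 flows2 → Spec_balance_lte flows1 flows2 (balance_lte flows1 flows2)

-- ===== LEMMAS AND PROOFS =====

-- volatility of a combined list, as A computes it
def pvVolOf (c : List Int) : Int :=
  ((PySem.List.max? c (fun v => v)).getD 0) - ((PySem.List.min? c (fun v => v)).getD 0)

-- A's padding loop builds replicate-padded lists
lemma pad_eq (x y : List Int) (p : Nat) :
    pyCalculatePadding x y (p : Int) = (List.replicate p 0 ++ x, y ++ List.replicate p 0) := by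
  induction p with
  | zero => simp [pyCalculatePadding]
  | succ k ih =>
    have hcast : ((k + 1 : Nat) : Int) = (k : Int) + 1 := by push_cast; ring
    rw [pyCalculatePadding, hcast, PySem.List.pyRange_one_succ_right (by positivity),
        List.foldl_append]
    rw [pyCalculatePadding] at ih
    rw [ih]
    have hrep : (List.replicate k (0:Int)) ++ [0] = 0 :: List.replicate k 0 := by
      rw [← List.replicate_succ', ← List.replicate_succ]
    simp [PySem.List.insert_zero, List.replicate_succ, hrep]

lemma zipWith_replicate_left (l : List Int) (p : Nat) (h : l.length ≤ p) :
    List.zipWith (fun a b => a + b) (List.replicate p (0 : Int)) l = l := by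
  induction l generalizing p with
  | nil => simp
  | cons a t ih =>
    cases p with
    | zero => simp at h
    | succ k =>
      simp only [List.replicate_succ, List.zipWith_cons_cons, zero_add]
      rw [ih k (by simpa using h)]

lemma zipWith_replicate_right (l : List Int) (p : Nat) (h : l.length ≤ p) :
    List.zipWith (fun a b => a + b) l (List.replicate p (0 : Int)) = l := by
  induction l generalizing p with
  | nil => simp
  | cons a t ih =>
    cases p with
    | zero => simp at h
    | succ k =>
      simp only [List.replicate_succ, List.zipWith_cons_cons, add_zero]
      rw [ih k (by simpa using h)]

lemma zipWith_take_left (f : Int → Int → Int) (l l' : List Int) (m : Nat) (h : l'.length ≤ m) :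
    List.zipWith f (l.take m) l' = List.zipWith f l l' := by
  induction l generalizing l' m with
  | nil => simp
  | cons a t ih =>
    cases l' with
    | nil => simp
    | cons b t' =>
      cases m with
      | zero => simp at h
      | succ k => simp only [List.take_succ_cons, List.zipWith_cons_cons]
                  rw [ih t' k (by simpa using h)]

-- decomposition of A's combined series for shift p
lemma comb_eq (x y : List Int) (p : Nat) (hlen : x.length = y.length)
    (hpn : p ≤ x.length) :
    List.zipWith (fun a b => a + b) (List.replicate p 0 ++ x) (y ++ List.replicate p 0)
      = y.take p ++ List.zipWith (fun a b => a + b) x (y.drop p) ++ x.drop (x.length - p) := by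
  have hy : y = y.take p ++ y.drop p := by simp
  calc List.zipWith (fun a b => a + b) (List.replicate p 0 ++ x) (y ++ List.replicate p 0)
      = List.zipWith (fun a b => a + b) (List.replicate p 0 ++ x)
          ((y.take p ++ y.drop p) ++ List.replicate p 0) := by rw [← hy]
    _ = List.zipWith (fun a b => a + b) (List.replicate p 0 ++ x)
          (y.take p ++ (y.drop p ++ List.replicate p 0)) := by rw [List.append_assoc]
    _ = List.zipWith (fun a b => a + b) (List.replicate p 0) (y.take p)
          ++ List.zipWith (fun a b => a + b) x (y.drop p ++ List.replicate p 0) := by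
          rw [List.zipWith_append (by simp; omega)]
    _ = y.take p ++ List.zipWith (fun a b => a + b) x (y.drop p ++ List.replicate p 0) := by
          rw [zipWith_replicate_left _ _ (by simp)]
    _ = y.take p ++ (List.zipWith (fun a b => a + b) (x.take (x.length - p) ++ x.drop (x.length - p))
          (y.drop p ++ List.replicate p 0)) := by rw [List.take_append_drop]
    _ = y.take p ++ (List.zipWith (fun a b => a + b) (x.take (x.length - p)) (y.drop p)
          ++ List.zipWith (fun a b => a + b) (x.drop (x.length - p)) (List.replicate p 0)) := by
          rw [List.zipWith_append (by simp; omega)]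
    _ = y.take p ++ List.zipWith (fun a b => a + b) x (y.drop p) ++ x.drop (x.length - p) := by
          rw [zipWith_take_left _ _ _ _ (by simp; omega),
              zipWith_replicate_right _ _ (by simp; omega), List.append_assoc]

lemma pvStep_eq (a b v : Int) : pvStep (a, b) v = (max a v, min b v) := by
  simp only [pvStep, Prod.mk.injEq]
  constructor <;> split_ifs <;> omega

lemma pairFold (t : List Int) (a b : Int) :
    t.foldl pvStep (a, b) = (t.foldl max a, t.foldl min b) := by
  induction t generalizing a b with
  | nil => rfl
  | cons v t ih => rw [List.foldl_cons, pvStep_eq, ih]; rfl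

lemma zipFold (x l : List Int) (init : Int × Int) :
    (x.zip l).foldl (fun hl ab => pvStep hl (ab.1 + ab.2)) init
      = (List.zipWith (fun a b => a + b) x l).foldl pvStep init := by
  have h : List.zipWith (fun a b => a + b) x l = (x.zip l).map (fun ab => ab.1 + ab.2) := by
    simp [List.zip]
  rw [h, List.foldl_map]

lemma vol_cons (a : Int) (t : List Int) :
    pvVolOf (a :: t) = t.foldl max a - t.foldl min a := by
  rw [pvVolOf, PySem.List.max?_id_cons, PySem.List.min?_id_cons]; rfl

-- B's per-shift streaming pass computes the volatility of A's combined series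
lemma shift_vol_eq (x y : List Int) (p : Nat) (hlen : x.length = y.length)
    (hp1 : 1 ≤ p) (hpn : p ≤ x.length) :
    pyShiftVol x y (p : Int) (x.length : Int)
      = pvVolOf (y.take p ++ List.zipWith (fun a b => a + b) x (y.drop p)
                  ++ x.drop (x.length - p)) := by
  obtain ⟨y0, yt, rfl⟩ : ∃ y0 yt, y = y0 :: yt := by
    cases y with
    | nil => rw [List.length_nil] at hlen; omega
    | cons a t => exact ⟨a, t, rfl⟩
  have htake : (y0 :: yt).take p = y0 :: yt.take (p - 1) := by
    cases p with
    | zero => omega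
    | succ k => simp
  rw [pyShiftVol]
  have hget : (PySem.List.pyGet? (y0 :: yt) 0).getD 0 = y0 := by
    simp [PySem.List.pyGet?, PySem.List.pyIdx?]
  have hslice1 : PySem.List.slice (y0 :: yt) (some 1) (some (p : Int)) = yt.take (p - 1) := by
    rw [PySem.List.slice_toNat (a := 1) (b := (p : Int)) _ (by omega) (by omega)]
    simp
  have hslice2 : PySem.List.slice (y0 :: yt) (some (p : Int)) none = (y0 :: yt).drop p :=
    PySem.List.slice_from_natCast _ p
  have hslice3 : PySem.List.slice x (some ((x.length : Int) - (p : Int))) none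
      = x.drop (x.length - p) := by
    have : ((x.length : Int) - (p : Int)) = ((x.length - p : Nat) : Int) := by push_cast [hpn]; ring
    rw [this, PySem.List.slice_from_natCast]
  rw [hget, hslice1, hslice2, hslice3, zipFold, ← List.foldl_append, ← List.foldl_append]
  rw [← List.append_assoc]
  rw [pairFold]
  have : (y0 :: yt).take p ++ List.zipWith (fun a b => a + b) x ((y0 :: yt).drop p)
        ++ x.drop (x.length - p)
      = y0 :: (yt.take (p - 1) ++ List.zipWith (fun a b => a + b) x ((y0 :: yt).drop p)
        ++ x.drop (x.length - p)) := by
    rw [htake]; simp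
  rw [this, vol_cons]

-- folding min over the flatMap of two-element blocks is B's running-minimum loop
lemma flatMap_min_fold {α : Type} (l : List α) (f g : α → Int) (init : Int) :
    (l.flatMap (fun i => [f i, g i])).foldl min init
      = l.foldl (fun b i => min (min b (f i)) (g i)) init := by
  induction l generalizing init with
  | nil => rfl
  | cons i t ih => simp only [List.flatMap_cons, List.foldl_append, List.foldl_cons, List.foldl_nil]; rw [ih]


-- one shift block: A's volatility of the padded combination = B's streaming pass
lemma blockA (x y : List Int) (k : Nat) (hlen : x.length = y.length) (hk : k + 1 ≤ x.length) :
    (PySem.List.max? (List.zipWith (fun a b => a + b) (pyCalculatePadding x y ((k : Int) + 1)).1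
        (pyCalculatePadding x y ((k : Int) + 1)).2) (fun v => v)).getD 0
      - (PySem.List.min? (List.zipWith (fun a b => a + b) (pyCalculatePadding x y ((k : Int) + 1)).1
        (pyCalculatePadding x y ((k : Int) + 1)).2) (fun v => v)).getD 0
      = pyShiftVol x y (1 + (k : Int)) ((x.length : Int)) := by
  have h1 : ((k : Int) + 1) = ((k + 1 : Nat) : Int) := by push_cast; ring
  have h2 : (1 + (k : Int)) = ((k + 1 : Nat) : Int) := by push_cast; ring
  rw [h1, h2, pad_eq, comb_eq x y (k + 1) hlen hk,
      shift_vol_eq x y (k + 1) hlen (by omega) hk]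
  rfl

-- ===== VERDICT (by name: the statement is the Claim_ definition above) =====
theorem balance_lte_spec : Claim_equal_balance_lte := by
  intro f1 f2 _hdom hpre
  obtain ⟨hlen, hne⟩ := hpre
  unfold Spec_balance_lte
  have hlenZ : ¬((f1.length : Int) ≠ (f2.length : Int)) := by simp [hlen]
  rw [balance_lte, balance_lte_alt, if_neg hlenZ, if_neg hlenZ]
  simp only [PySem.List.foldl_append_eq_flatMap, List.nil_append, List.singleton_append]
  simp only [← List.map_eq_flatMap, List.map_cons, List.map_flatMap, List.map_map]
  rw [PySem.List.min?_id_cons, Option.getD_some]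
  simp only [List.map_nil]
  obtain ⟨a, t1, rfl⟩ := List.exists_cons_of_ne_nil hne
  obtain ⟨b, t2, rfl⟩ : ∃ b t2, f2 = b :: t2 := by
    cases f2 with
    | nil => rw [List.length_nil] at hlen; simp at hlen
    | cons b t2 => exact ⟨b, t2, rfl⟩
  have hr1 : PySem.List.pyRange 0 (((a :: t1).length : Int) - 1)
      = (List.range ((a :: t1).length - 1)).map (fun k : Nat => (k : Int)) := by
    rw [PySem.List.pyRange_one]
    have h : (((a :: t1).length : Int) - 1 - 0).toNat = (a :: t1).length - 1 := by omega
    rw [h]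
    exact List.map_congr_left (fun k _ => by omega)
  have hr2 : PySem.List.pyRange 1 ((a :: t1).length : Int)
      = (List.range ((a :: t1).length - 1)).map (fun k : Nat => 1 + (k : Int)) := by
    rw [PySem.List.pyRange_one]
    have h : (((a :: t1).length : Int) - 1).toNat = (a :: t1).length - 1 := by omega
    rw [h]
  rw [hr1, List.flatMap_map, flatMap_min_fold, hr2, List.foldl_map]
  have hbase : ((List.foldl (fun hl ab => pvStep hl (ab.1 + ab.2))
          ((PySem.List.pyGet? (a :: t1) 0).getD 0 + (PySem.List.pyGet? (b :: t2) 0).getD 0,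
            (PySem.List.pyGet? (a :: t1) 0).getD 0 + (PySem.List.pyGet? (b :: t2) 0).getD 0)
          ((PySem.List.slice (a :: t1) (some 1)).zip (PySem.List.slice (b :: t2) (some 1)))).1 -
      (List.foldl (fun hl ab => pvStep hl (ab.1 + ab.2))
          ((PySem.List.pyGet? (a :: t1) 0).getD 0 + (PySem.List.pyGet? (b :: t2) 0).getD 0,
            (PySem.List.pyGet? (a :: t1) 0).getD 0 + (PySem.List.pyGet? (b :: t2) 0).getD 0)
          ((PySem.List.slice (a :: t1) (some 1)).zip (PySem.List.slice (b :: t2) (some 1)))).2)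
      = (PySem.List.max? (List.zipWith (fun a b => a + b) (a :: t1) (b :: t2)) (fun v => v)).getD 0
        - (PySem.List.min? (List.zipWith (fun a b => a + b) (a :: t1) (b :: t2)) (fun v => v)).getD 0 := by
    have hg1 : (PySem.List.pyGet? (a :: t1) 0).getD 0 = a := by
      simp [PySem.List.pyGet?, PySem.List.pyIdx?]
    have hg2 : (PySem.List.pyGet? (b :: t2) 0).getD 0 = b := by
      simp [PySem.List.pyGet?, PySem.List.pyIdx?]
    rw [hg1, hg2, PySem.List.slice_from_one, PySem.List.slice_from_one, List.tail_cons,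
        List.tail_cons, zipFold, pairFold, List.zipWith_cons_cons,
        PySem.List.max?_id_cons, PySem.List.min?_id_cons]
    rfl
  rw [hbase]
  have hcast : (((a :: t1).length : Int)) = (((b :: t2).length : Int)) := by exact_mod_cast hlen
  refine PySem.List.foldl_congr_mem _ _ _ _ (fun acc k hk => ?_)
  have hklt : k < (a :: t1).length - 1 := List.mem_range.mp hk
  have hn : t1.length = t2.length := by simpa using hlen
  have hk1 : k + 1 ≤ (a :: t1).length := by simp only [List.length_cons] at hklt ⊢; omega
  have hk2 : k + 1 ≤ (b :: t2).length := by simp only [List.length_cons] at hklt ⊢; omega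
  rw [blockA (a :: t1) (b :: t2) k hlen hk1, blockA (b :: t2) (a :: t1) k hlen.symm hk2, hcast]
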